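-- pv_equiv track=rewrite | github.com/smartdash-almasana/SmartPyme | extraction/metadata_extractor.py | _infer_has_tables
-- ===== SOURCE A (Python) =====
-- def _infer_has_tables(text: str) -> bool:
--     """Infer whether text contains table-like structures."""
--     lower_text = text.lower()
--     if "<table>" in lower_text or "<tr>" in lower_text:
--         return True
--
--     lines = text.strip().split("\n")
--     if len(lines) > 2:
--         separators = [",", "\t", "|"]
--         for sep in separators:
--             lines_with_sep = [line for line in lines if sep in line]
--             if len(lines_with_sep) > 1:
--                 counts = [line.count(sep) for line in lines_with_sep[:5]]
--                 if len(counts) > 1 and counts[0] > 0 and all(c == counts[0] for c in counts):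
--                     return True
--
--     return False
-- ===== SOURCE B (Python) =====
-- def _infer_has_tables(text: str) -> bool:
--     """Infer whether text contains table-like structures (single-pass over lines)."""
--     lower_text = text.lower()
--     if "<table>" in lower_text or "<tr>" in lower_text:
--         return True
--     lines = text.strip().split("\n")
--     if len(lines) <= 2:
--         return False
--     seps = (",", "\t", "|")
--     totals = [0, 0, 0]
--     firsts = [[], [], []]
--     for line in lines:
--         for i, sep in enumerate(seps):
--             if sep in line:
--                 totals[i] += 1
--                 if len(firsts[i]) < 5:
--                     firsts[i].append(line.count(sep))
--     for i in range(3):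
--         if totals[i] > 1 and firsts[i][0] > 0 and all(c == firsts[i][0] for c in firsts[i]):
--             return True
--     return False
-- ===== Notes on version B (the rewrite author's own statement) =====
-- stated objective: alternative
-- what changed: Replaces the per-separator filter+slice+map passes over all lines with one single pass over the lines that maintains, for each of the three separators, a running total and the separator-counts of the first five matching lines, judged after the pass.
import Mathlib
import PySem

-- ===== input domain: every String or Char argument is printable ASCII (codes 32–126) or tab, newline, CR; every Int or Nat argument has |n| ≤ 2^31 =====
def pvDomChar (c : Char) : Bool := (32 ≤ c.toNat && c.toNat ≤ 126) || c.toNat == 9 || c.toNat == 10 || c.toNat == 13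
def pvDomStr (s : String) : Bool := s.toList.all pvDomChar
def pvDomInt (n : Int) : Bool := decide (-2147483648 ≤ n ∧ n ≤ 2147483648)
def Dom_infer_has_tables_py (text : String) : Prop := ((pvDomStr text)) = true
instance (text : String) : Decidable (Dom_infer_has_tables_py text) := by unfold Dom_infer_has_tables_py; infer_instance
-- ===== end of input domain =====

-- B is a single-pass restructuring of A's per-separator filter/slice/map scans; A = B on all inputs.

-- ===== PORT A =====
-- literal transliteration of A: per separator, filter the lines, then slice/map/test;
-- text.strip().split("\n") is Str.split? with the non-empty literal "\n" (always some, .getD []);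
-- lines_with_sep[:5] is List.take 5; counts[0] is headD, guarded by the len(counts) > 1 test
def infer_has_tables_py (text : String) : Bool :=
  if PySem.Str.isIn "<table>" (PySem.Str.lower text) || PySem.Str.isIn "<tr>" (PySem.Str.lower text) then true
  else
    if ((PySem.Str.split? (PySem.Str.strip text) "\n").getD []).length > 2 then
      -- the for-loop returns True on the first qualifying separator, else falls through: List.any
      [",", "\t", "|"].any (fun sep =>
        if (((PySem.Str.split? (PySem.Str.strip text) "\n").getD []).filter
              (fun line => PySem.Str.isIn sep line)).length > 1 then
          decide (1 < (((((PySem.Str.split? (PySem.Str.strip text) "\n").getD []).filter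
              (fun line => PySem.Str.isIn sep line)).take 5).map
                (fun line => (PySem.Str.count line sep : Int))).length) &&
          decide (0 < (((((PySem.Str.split? (PySem.Str.strip text) "\n").getD []).filter
              (fun line => PySem.Str.isIn sep line)).take 5).map
                (fun line => (PySem.Str.count line sep : Int))).headD 0) &&
          (((((PySem.Str.split? (PySem.Str.strip text) "\n").getD []).filter
              (fun line => PySem.Str.isIn sep line)).take 5).map
                (fun line => (PySem.Str.count line sep : Int))).all
            (fun c => c == (((((PySem.Str.split? (PySem.Str.strip text) "\n").getD []).filter
              (fun line => PySem.Str.isIn sep line)).take 5).map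
                (fun line => (PySem.Str.count line sep : Int))).headD 0)
        else false)
    else false

-- ===== PORT B =====
-- per-separator accumulator: (total count of lines with sep, counts of first ≤5 such lines)
def altUpd (line : String) (sep : String) (p : Int × List Int) : Int × List Int :=
  if PySem.Str.isIn sep line then
    (p.1 + 1, if p.2.length < 5 then p.2 ++ [(PySem.Str.count line sep : Int)] else p.2)
  else p

def altStep (st : (Int × List Int) × (Int × List Int) × (Int × List Int)) (line : String) :
    (Int × List Int) × (Int × List Int) × (Int × List Int) :=
  (altUpd line "," st.1, altUpd line "\t" st.2.1, altUpd line "|" st.2.2)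

def altOk (p : Int × List Int) : Bool :=
  match p.2 with
  | [] => false
  | c0 :: _ => decide (1 < p.1) && decide (0 < c0) && p.2.all (fun c => c == c0)

def infer_has_tables_py_alt (text : String) : Bool :=
  if PySem.Str.isIn "<table>" (PySem.Str.lower text) || PySem.Str.isIn "<tr>" (PySem.Str.lower text) then true
  else
    if ((PySem.Str.split? (PySem.Str.strip text) "\n").getD []).length ≤ 2 then false
    else
      altOk (((PySem.Str.split? (PySem.Str.strip text) "\n").getD []).foldl altStep
        (((0 : Int), []), ((0 : Int), []), ((0 : Int), []))).1 ||
      altOk (((PySem.Str.split? (PySem.Str.strip text) "\n").getD []).foldl altStep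
        (((0 : Int), []), ((0 : Int), []), ((0 : Int), []))).2.1 ||
      altOk (((PySem.Str.split? (PySem.Str.strip text) "\n").getD []).foldl altStep
        (((0 : Int), []), ((0 : Int), []), ((0 : Int), []))).2.2

-- ===== PRECONDITION & SPEC =====
def Spec_infer_has_tables_py (text : String) (out : Bool) : Prop := out = infer_has_tables_py_alt text
instance (text : String) (out : Bool) : Decidable (Spec_infer_has_tables_py text out) := by unfold Spec_infer_has_tables_py; infer_instance

-- ===== CLAIM (what is proved, stated in full; the proofs are below) =====
def Claim_equal_infer_has_tables_py : Prop := ∀ (text : String), Dom_infer_has_tables_py text → Spec_infer_has_tables_py text (infer_has_tables_py text)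

-- ===== LEMMAS AND PROOFS =====

-- the triple fold is three independent single-separator folds
theorem foldl_altStep_proj (lines : List String) (a b c : Int × List Int) :
    lines.foldl altStep (a, b, c) =
      (lines.foldl (fun p line => altUpd line "," p) a,
       lines.foldl (fun p line => altUpd line "\t" p) b,
       lines.foldl (fun p line => altUpd line "|" p) c) := by
  induction lines generalizing a b c with
  | nil => rfl
  | cons l t ih => simpa [altStep] using ih _ _ _

-- characterisation of the single-separator fold
theorem foldl_altUpd_spec (sep : String) (lines : List String) (n : Int) (fs : List Int)
    (h : fs.length ≤ 5) :
    lines.foldl (fun p line => altUpd line sep p) (n, fs) =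
      (n + ((lines.filter (fun line => PySem.Str.isIn sep line)).length : Int),
       fs ++ (((lines.filter (fun line => PySem.Str.isIn sep line)).take (5 - fs.length)).map
         (fun line => (PySem.Str.count line sep : Int)))) := by
  induction lines generalizing n fs with
  | nil => simp
  | cons l t ih =>
    rw [List.foldl_cons, List.filter_cons]
    by_cases hl : PySem.Str.isIn sep l = true
    · rw [if_pos hl]
      by_cases hf : fs.length < 5
      · rw [show altUpd l sep (n, fs) = (n + 1, fs ++ [(PySem.Str.count l sep : Int)]) from by
          unfold altUpd; rw [if_pos hl]; simp only [hf, if_pos]]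
        rw [ih _ _ (by simp; omega)]
        have h5 : 5 - fs.length = (5 - (fs.length + 1)) + 1 := by omega
        rw [h5, List.take_succ_cons, List.map_cons]
        refine Prod.ext ?_ ?_
        · simp only [List.length_cons]
          push_cast; ring
        · simp [List.length_append]
      · have hf5 : fs.length = 5 := by omega
        rw [show altUpd l sep (n, fs) = (n + 1, fs) from by unfold altUpd; rw [if_pos hl, if_neg hf]]
        rw [ih _ _ h]
        refine Prod.ext ?_ ?_
        · simp only [List.length_cons]
          push_cast; ring
        · simp [hf5]
    · rw [if_neg hl, show altUpd l sep (n, fs) = (n, fs) from by unfold altUpd; rw [if_neg hl]]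
      exact ih n fs h

-- per-separator: A's test on filter/take/map equals altOk of the fold result
theorem sep_eq (sep : String) (lines : List String) :
    (if (lines.filter (fun line => PySem.Str.isIn sep line)).length > 1 then
       decide (1 < (((lines.filter (fun line => PySem.Str.isIn sep line)).take 5).map
           (fun line => (PySem.Str.count line sep : Int))).length) &&
       decide (0 < (((lines.filter (fun line => PySem.Str.isIn sep line)).take 5).map
           (fun line => (PySem.Str.count line sep : Int))).headD 0) &&
       (((lines.filter (fun line => PySem.Str.isIn sep line)).take 5).map
           (fun line => (PySem.Str.count line sep : Int))).all
         (fun c => c == (((lines.filter (fun line => PySem.Str.isIn sep line)).take 5).map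
           (fun line => (PySem.Str.count line sep : Int))).headD 0)
     else false) =
    altOk (lines.foldl (fun p line => altUpd line sep p) ((0 : Int), [])) := by
  rw [foldl_altUpd_spec sep lines 0 [] (by simp)]
  simp only [List.nil_append, List.length_nil, Nat.sub_zero, zero_add]
  set f := lines.filter (fun line => PySem.Str.isIn sep line) with hf
  by_cases h1 : f.length > 1
  · have hne : (f.take 5).map (fun line => (PySem.Str.count line sep : Int)) ≠ [] := by
      simp only [ne_eq, List.map_eq_nil_iff, List.take_eq_nil_iff]
      push Not
      constructor <;> [skip; exact List.ne_nil_of_length_pos (by omega)]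
      decide
    obtain ⟨c0, rest, hcr⟩ := List.exists_cons_of_ne_nil hne
    have hlen : 1 < ((f.take 5).map (fun line => (PySem.Str.count line sep : Int))).length := by
      simp only [List.length_map, List.length_take]
      omega
    rw [hcr] at hlen
    have hint : (1 : Int) < (f.length : Int) := by exact_mod_cast h1
    simp only [if_pos h1, altOk, hcr, List.headD_cons, hlen, decide_true, Bool.true_and,
      hint, List.all_cons, beq_self_eq_true]
  · simp only [if_neg h1, altOk]
    have hle : f.length ≤ 1 := by omega
    match hfl : f, h1 with
    | [], _ => simp
    | [x], _ => simp
    | x :: y :: rest, h1 => simp at hle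

-- ===== VERDICT (by name: the statement is the Claim_ definition above) =====
set_option maxHeartbeats 2000000 in
theorem infer_has_tables_py_spec : Claim_equal_infer_has_tables_py := by
  intro text _
  unfold Spec_infer_has_tables_py infer_has_tables_py infer_has_tables_py_alt
  by_cases hhtml : (PySem.Str.isIn "<table>" (PySem.Str.lower text) ||
      PySem.Str.isIn "<tr>" (PySem.Str.lower text)) = true
  · rw [if_pos hhtml, if_pos hhtml]
  · rw [if_neg hhtml, if_neg hhtml]
    set lines := (PySem.Str.split? (PySem.Str.strip text) "\n").getD [] with hl
    by_cases h2 : lines.length > 2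
    · have h2' : ¬ lines.length ≤ 2 := by omega
      rw [if_pos h2, if_neg h2', foldl_altStep_proj]
      simp only [List.any_cons, List.any_nil, Bool.or_false, sep_eq]
      rw [Bool.or_assoc]
    · have h2' : lines.length ≤ 2 := by omega
      rw [if_neg h2, if_pos h2']
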